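-- pv_equiv track=rewrite | github.com/yannickloth/W33-Theory | bundles/v10_clifford_cycle/clifford_v10/compute_clifford_reduction.py | reduce_ports
-- ===== SOURCE A (Python) =====
-- def cliff_mult(a_mask, a_sign, b_mask, b_sign):
--     sign = a_sign * b_sign
--     swaps = 0
--     for j in range(3):
--         if (b_mask >> j) & 1:
--             swaps += bin(a_mask & ((1 << j) - 1)).count("1")
--     if swaps % 2 == 1:
--         sign *= -1
--     return a_mask ^ b_mask, sign
--
-- def reduce_ports(ports):
--     mask = 0
--     sign = 1
--     for p in ports:
--         if p < 0:
--             continue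
--         mask, sign = cliff_mult(mask, sign, 1 << p, 1)
--     return mask, sign
-- ===== SOURCE B (Python) =====
-- def reduce_ports(ports):
--     # Pass 1: the mask is just the XOR of 1<<p over nonnegative ports.
--     mask = 0
--     for p in ports:
--         if p >= 0:
--             mask ^= 1 << p
--     # Pass 2: the sign is the parity of strictly ascending ordered pairs
--     # among ports in {0,1,2}; count them with running occurrence counters.
--     asc = 0
--     c0 = 0
--     c1 = 0
--     for p in ports:
--         if p == 0:
--             c0 += 1
--         elif p == 1:
--             asc += c0
--             c1 += 1
--         elif p == 2:
--             asc += c0 + c1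
--     return mask, (-1 if asc % 2 else 1)
-- ===== Notes on version B (the rewrite author's own statement) =====
-- stated objective: alternative
-- what changed: Replaces A's interleaved mask/sign state machine (per-step popcount of the low mask bits inside cliff_mult) by two independent passes: one XOR pass for the mask, and a counter pass computing the sign as the parity of strictly ascending ordered pairs among ports in {0,1,2}.
import Mathlib
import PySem

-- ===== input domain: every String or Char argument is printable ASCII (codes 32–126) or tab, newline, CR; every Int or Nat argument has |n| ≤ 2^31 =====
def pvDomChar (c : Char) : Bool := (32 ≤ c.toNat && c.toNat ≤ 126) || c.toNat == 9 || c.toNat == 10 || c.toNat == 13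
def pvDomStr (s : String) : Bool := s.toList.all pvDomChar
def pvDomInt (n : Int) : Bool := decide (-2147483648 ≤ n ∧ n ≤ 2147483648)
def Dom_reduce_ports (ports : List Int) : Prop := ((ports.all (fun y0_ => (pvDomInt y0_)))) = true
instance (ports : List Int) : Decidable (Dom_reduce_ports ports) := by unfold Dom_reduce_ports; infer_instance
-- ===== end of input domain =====

-- B replaces A's interleaved mask/sign state machine by two independent passes
-- (an XOR pass for the mask; the sign as the parity of ascending pairs among ports
-- in {0,1,2}, counted with running counters); alternative decomposition, same O(n) cost.

-- ===== PORT A =====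
-- bin(x).count("1") is ported as PySem.Int.bitCount, which matches bin().count("1") on every int.
def cliff_mult (a_mask a_sign b_mask b_sign : Int) : Int × Int :=
  let sign := a_sign * b_sign
  let swaps := (PySem.List.pyRange 0 3 1).foldl (fun swaps j =>
    if PySem.Int.band (b_mask >>> j.toNat) 1 == 1 then
      swaps + (PySem.Int.bitCount (PySem.Int.band a_mask ((1:Int) <<< j.toNat - 1)) : Int)
    else swaps) 0
  let sign := if PySem.Int.mod swaps 2 == 1 then sign * -1 else sign
  (PySem.Int.bxor a_mask b_mask, sign)

def reduce_ports (ports : List Int) : Int × Int :=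
  ports.foldl (fun (st : Int × Int) (p : Int) =>
    if p < 0 then st
    else cliff_mult st.1 st.2 ((1:Int) <<< p.toNat) 1) (0, 1)

-- ===== PORT B =====
def reduce_ports_alt (ports : List Int) : Int × Int :=
  let mask := ports.foldl (fun (m : Int) (p : Int) =>
    if 0 ≤ p then PySem.Int.bxor m ((1:Int) <<< p.toNat) else m) 0
  let st := ports.foldl (fun (st : Nat × Nat × Nat) (p : Int) =>
    if p = 0 then (st.1, st.2.1 + 1, st.2.2)
    else if p = 1 then (st.1 + st.2.1, st.2.1, st.2.2 + 1)
    else if p = 2 then (st.1 + st.2.1 + st.2.2, st.2.1, st.2.2)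
    else st) (0, 0, 0)
  (mask, if st.1 % 2 = 1 then (-1 : Int) else 1)

-- ===== PRECONDITION & SPEC =====
def Spec_reduce_ports (ports : List Int) (out : Int × Int) : Prop := out = reduce_ports_alt ports
instance (ports : List Int) (out : Int × Int) : Decidable (Spec_reduce_ports ports out) := by unfold Spec_reduce_ports; infer_instance

-- ===== CLAIM (what is proved, stated in full; the proofs are below) =====
def Claim_equal_reduce_ports : Prop := ∀ (ports : List Int), Dom_reduce_ports ports → Spec_reduce_ports ports (reduce_ports ports)

-- ===== LEMMAS AND PROOFS =====

lemma bxor_cast (n x : Nat) : PySem.Int.bxor ((n : Nat) : Int) ((x : Nat) : Int) = ((n ^^^ x : Nat) : Int) := by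
  exact_mod_cast PySem.Int.bxor_natCast n x

lemma cliff_step (n : Nat) (s : Int) (k : Nat) :
    cliff_mult ((n : Nat) : Int) s ((1:Int) <<< ((k : Nat) : Int)) 1 =
      (((n ^^^ 2^k : Nat) : Int),
       if k = 1 then (if n % 2 = 1 then -s else s)
       else if k = 2 then (if (n % 2 + n / 2 % 2) % 2 = 1 then -s else s)
       else s) := by
  have bit0 : PySem.Int.bitCount (0:Int) = 0 := rfl
  have bit1 : PySem.Int.bitCount (1:Int) = 1 := rfl
  have bit2 : PySem.Int.bitCount (2:Int) = 1 := rfl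
  have bit3 : PySem.Int.bitCount (3:Int) = 2 := rfl
  have cast2 : ((n:Int)) % 2 = ((n % 2 : Nat) : Int) := by push_cast; ring
  rcases k with _ | _ | _ | k
  · -- k = 0
    have bx : PySem.Int.bxor ((n:Nat):Int) 1 = ((n ^^^ 1 : Nat) : Int) := bxor_cast n 1
    have f0 : PySem.Int.band ((1:Int) >>> (0:Int)) 1 = 1 := by decide
    have f1 : PySem.Int.band ((1:Int) >>> (1:Int)) 1 = 0 := by decide
    have f2 : PySem.Int.band ((1:Int) >>> (2:Int)) 1 = 0 := by decide
    have g0 : ((1:Int) <<< (0:Int) - 1) = 0 := by decide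
    have s0 : ((1:Int) <<< (0:Int)) = 1 := by decide
    simp [cliff_mult, show PySem.List.pyRange 0 3 1 = [0,1,2] from rfl, List.foldl]
    simp [s0, f0, f1, f2, bx]
  · -- k = 1
    have bx : PySem.Int.bxor ((n:Nat):Int) ((1:Int) <<< (1:Int)) = ((n ^^^ 2 : Nat) : Int) := by
      rw [show ((1:Int) <<< (1:Int)) = ((2:Nat):Int) by decide]; exact bxor_cast n 2
    have hb : PySem.Int.band ((n:Int)) ((1:Int) <<< (1:Int) - 1) = ((n % 2 : Nat) : Int) := by
      rw [show ((1:Int) <<< (1:Int) - 1) = ((1:Nat) : Int) by decide]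
      rw [show PySem.Int.band (↑n) ((1:Nat):Int) = ((n &&& 1 : Nat) : Int) from by exact_mod_cast PySem.Int.band_natCast n 1]
      rw [Nat.and_one_is_mod]
    have e0 : PySem.Int.band ((1:Int) <<< (1:Int) >>> (0:Int)) 1 = 0 := by decide
    have e1 : PySem.Int.band ((1:Int) <<< (1:Int) >>> (1:Int)) 1 = 1 := by decide
    have e2 : PySem.Int.band ((1:Int) <<< (1:Int) >>> (2:Int)) 1 = 0 := by decide
    have g0 : ((1:Int) <<< (0:Int) - 1) = 0 := by decide
    simp [cliff_mult, show PySem.List.pyRange 0 3 1 = [0,1,2] from rfl, List.foldl]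
    simp [e0, e1, e2, hb, bx]
    rcases Nat.mod_two_eq_zero_or_one n with h | h <;> simp [cast2, h, bit0, bit1]
  · -- k = 2
    have bx : PySem.Int.bxor ((n:Nat):Int) ((1:Int) <<< (2:Int)) = ((n ^^^ 4 : Nat) : Int) := by
      rw [show ((1:Int) <<< (2:Int)) = ((4:Nat):Int) by decide]; exact bxor_cast n 4
    have hand : n &&& 3 = n % 4 := by
      have := Nat.and_two_pow_sub_one_eq_mod n 2; norm_num at this; omega
    have hb : PySem.Int.band ((n:Int)) ((1:Int) <<< (2:Int) - 1) = ((n % 4 : Nat) : Int) := by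
      rw [show ((1:Int) <<< (2:Int) - 1) = ((3:Nat) : Int) by decide]
      rw [show PySem.Int.band (↑n) ((3:Nat):Int) = ((n &&& 3 : Nat) : Int) from by exact_mod_cast PySem.Int.band_natCast n 3]
      rw [hand]
    have e0 : PySem.Int.band ((1:Int) <<< (2:Int) >>> (0:Int)) 1 = 0 := by decide
    have e1 : PySem.Int.band ((1:Int) <<< (2:Int) >>> (1:Int)) 1 = 0 := by decide
    have e2 : PySem.Int.band ((1:Int) <<< (2:Int) >>> (2:Int)) 1 = 1 := by decide
    obtain ⟨r, hr, hrlt⟩ : ∃ r, n % 4 = r ∧ r < 4 := ⟨n % 4, rfl, by omega⟩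
    have hb' : PySem.Int.band ((n:Int)) ((1:Int) <<< (2:Int) - 1) = ((r : Nat) : Int) := by rw [hb, hr]
    have hp' : (n % 2 + n / 2 % 2) % 2 = (r % 2 + r / 2 % 2) % 2 := by omega
    rw [hp']
    clear hb hr
    simp [cliff_mult, show PySem.List.pyRange 0 3 1 = [0,1,2] from rfl, List.foldl]
    simp [e0, e1, e2, hb', bx]
    interval_cases r <;> simp [bit0, bit1, bit2, bit3]
  · -- k ≥ 3
    have hbig : ((1:Int) <<< (((k+3:Nat)) : Int)) = ((2^(k+3) : Nat) : Int) := by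
      rw [Int.shiftLeft_natCast_right]
      rw [show ((1:Int) <<< (k+3:Nat)) = ((1 <<< (k+3) : Nat) : Int) from rfl, Nat.one_shiftLeft]
    have bx : PySem.Int.bxor ((n:Nat):Int) ((1:Int) <<< (((k+3:Nat)) : Int)) = ((n ^^^ 2^(k+3) : Nat) : Int) := by
      rw [hbig]; exact bxor_cast n (2^(k+3))
    have hz : ∀ j : Nat, j ≤ 2 → PySem.Int.band (((1:Int) <<< (((k+3:Nat)) : Int)) >>> ((j:Nat):Int)) 1 = 0 := by
      intro j hj
      rw [hbig, Int.shiftRight_natCast]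
      rw [Nat.shiftRight_eq_div_pow, Nat.pow_div (by omega) (by norm_num)]
      rw [show PySem.Int.band (((2^(k+3-j) : Nat)):Int) 1 = ((2^(k+3-j) &&& 1 : Nat) : Int) from by
        exact_mod_cast PySem.Int.band_natCast (2^(k+3-j)) 1]
      rw [Nat.and_one_is_mod]
      have : (2:Nat) ∣ 2^(k+3-j) := dvd_pow_self 2 (by omega)
      have h0 : (2:Nat)^(k+3-j) % 2 = 0 := by omega
      rw [h0]; rfl
    have z0 := hz 0 (by omega); have z1 := hz 1 (by omega); have z2 := hz 2 (by omega)
    norm_num at z0 z1 z2 bx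
    simp [cliff_mult, show PySem.List.pyRange 0 3 1 = [0,1,2] from rfl, List.foldl]
    simp [show ((k:Int)+1+1+1) = (k:Int)+3 from by ring, show (k+1+1+1) = k+3 from by ring,
      z0, z1, z2, bx]

lemma bxor_shift (n k : Nat) : PySem.Int.bxor ((n : Nat) : Int) ((1:Int) <<< ((k : Nat) : Int)) = ((n ^^^ 2^k : Nat) : Int) := by
  rw [Int.shiftLeft_natCast_right]
  rw [show ((1:Int) <<< (k:Nat)) = ((1 <<< k : Nat) : Int) from rfl, Nat.one_shiftLeft]
  exact bxor_cast n (2^k)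

-- bits 0 and 1 of n ^^^ 2^k in terms of those of n
lemma low_bits_xor (n k : Nat) :
    (n ^^^ 2^k) % 2 = (if k = 0 then n % 2 + 1 else n % 2) % 2 ∧
    (n ^^^ 2^k) / 2 % 2 = (if k = 1 then n / 2 % 2 + 1 else n / 2 % 2) % 2 := by
  have t0 := Nat.testBit_xor n (2^k) 0
  have t1 := Nat.testBit_xor n (2^k) 1
  rw [Nat.testBit_two_pow] at t0 t1
  simp only [Nat.testBit_eq_decide_div_mod_eq, pow_zero, Nat.div_one, pow_one] at t0 t1
  have h0 : n % 2 < 2 := Nat.mod_lt _ (by norm_num)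
  have h1 : n / 2 % 2 < 2 := Nat.mod_lt _ (by norm_num)
  have g0 : (n ^^^ 2^k) % 2 < 2 := Nat.mod_lt _ (by norm_num)
  have g1 : (n ^^^ 2^k) / 2 % 2 < 2 := Nat.mod_lt _ (by norm_num)
  constructor
  · by_cases hk : k = 0 <;> simp [hk] at t0 ⊢ <;> rcases Nat.mod_two_eq_zero_or_one n with h | h <;>
      simp [h] at t0 ⊢ <;> omega
  · by_cases hk : k = 1 <;> simp [hk] at t1 ⊢ <;> rcases Nat.mod_two_eq_zero_or_one (n / 2) with h | h <;>
      simp [h] at t1 ⊢ <;> omega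

-- sign-flip arithmetic: flipping sgn(asc) by the parity of c (= parity of b) gives sgn(asc + c)
lemma sgn_flip (asc c b : Nat) (hb : b % 2 = c % 2) :
    (if b % 2 = 1 then -(if asc % 2 = 1 then (-1:Int) else 1) else (if asc % 2 = 1 then (-1:Int) else 1))
      = if (asc + c) % 2 = 1 then (-1:Int) else 1 := by
  split_ifs <;> omega

-- main loop invariant: A's fold equals (B's mask fold, sign read off B's counter fold)
lemma loop_eq (ports : List Int) : ∀ (n : Nat) (s : Int) (asc c0 c1 : Nat),
    n % 2 = c0 % 2 → n / 2 % 2 = c1 % 2 →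
    s = (if asc % 2 = 1 then (-1:Int) else 1) →
    ports.foldl (fun (st : Int × Int) (p : Int) =>
        if p < 0 then st
        else cliff_mult st.1 st.2 ((1:Int) <<< p.toNat) 1) (((n:Nat):Int), s)
    = (ports.foldl (fun (m : Int) (p : Int) =>
          if 0 ≤ p then PySem.Int.bxor m ((1:Int) <<< p.toNat) else m) ((n:Nat):Int),
       if (ports.foldl (fun (st : Nat × Nat × Nat) (p : Int) =>
            if p = 0 then (st.1, st.2.1 + 1, st.2.2)
            else if p = 1 then (st.1 + st.2.1, st.2.1, st.2.2 + 1)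
            else if p = 2 then (st.1 + st.2.1 + st.2.2, st.2.1, st.2.2)
            else st) (asc, c0, c1)).1 % 2 = 1 then (-1:Int) else 1) := by
  induction ports with
  | nil => intro n s asc c0 c1 h0 h1 hs; simpa using hs
  | cons p ps IH =>
    intro n s asc c0 c1 h0 h1 hs
    by_cases hneg : p < 0
    · simp only [List.foldl, if_pos hneg,
        if_neg (show ¬(0 ≤ p) by omega), if_neg (show ¬(p = 0) by omega),
        if_neg (show ¬(p = 1) by omega), if_neg (show ¬(p = 2) by omega)]
      exact IH n s asc c0 c1 h0 h1 hs
    · obtain ⟨K, rfl⟩ := Int.eq_ofNat_of_zero_le (by omega : (0:Int) ≤ p)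
      have hx := low_bits_xor n K
      have hcs := cliff_step n s K
      have hbx := bxor_shift n K
      rcases K with _ | _ | _ | k
      · -- p = 0
        have hcs' : cliff_mult ((n:Nat):Int) s ((1:Int) <<< (((0:Nat)):Int)) 1
            = (((n ^^^ 1 : Nat) : Int), s) := cliff_step n s 0
        have hbx' : PySem.Int.bxor ((n:Nat):Int) ((1:Int) <<< (((0:Nat)):Int))
            = ((n ^^^ 1 : Nat) : Int) := bxor_shift n 0
        have hx0 : (n ^^^ 1) % 2 = (n % 2 + 1) % 2 := by simpa using hx.1
        have hx1 : (n ^^^ 1) / 2 % 2 = n / 2 % 2 := by simpa using hx.2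
        show List.foldl _ (cliff_mult ((n:Nat):Int) s ((1:Int) <<< (((0:Nat)):Int)) 1) ps
            = (List.foldl _ (PySem.Int.bxor ((n:Nat):Int) ((1:Int) <<< (((0:Nat)):Int))) ps,
               if (List.foldl _ (asc, c0 + 1, c1) ps).1 % 2 = 1 then (-1:Int) else 1)
        rw [hcs', hbx']
        exact IH _ _ asc (c0+1) c1 (by omega) (by omega) hs
      · -- p = 1
        have hcs' : cliff_mult ((n:Nat):Int) s ((1:Int) <<< (((1:Nat)):Int)) 1
            = (((n ^^^ 2 : Nat) : Int), if n % 2 = 1 then -s else s) := cliff_step n s 1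
        have hbx' : PySem.Int.bxor ((n:Nat):Int) ((1:Int) <<< (((1:Nat)):Int))
            = ((n ^^^ 2 : Nat) : Int) := bxor_shift n 1
        have hx0 : (n ^^^ 2) % 2 = n % 2 := by simpa using hx.1
        have hx1 : (n ^^^ 2) / 2 % 2 = (n / 2 % 2 + 1) % 2 := by simpa using hx.2
        show List.foldl _ (cliff_mult ((n:Nat):Int) s ((1:Int) <<< (((1:Nat)):Int)) 1) ps
            = (List.foldl _ (PySem.Int.bxor ((n:Nat):Int) ((1:Int) <<< (((1:Nat)):Int))) ps,
               if (List.foldl _ (asc + c0, c0, c1 + 1) ps).1 % 2 = 1 then (-1:Int) else 1)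
        rw [hcs', hbx']
        refine IH _ _ (asc + c0) c0 (c1+1) (by omega) (by omega) ?_
        rw [hs]
        exact sgn_flip asc c0 n h0
      · -- p = 2
        have hcs' : cliff_mult ((n:Nat):Int) s ((1:Int) <<< (((2:Nat)):Int)) 1
            = (((n ^^^ 4 : Nat) : Int), if (n % 2 + n / 2 % 2) % 2 = 1 then -s else s) := cliff_step n s 2
        have hbx' : PySem.Int.bxor ((n:Nat):Int) ((1:Int) <<< (((2:Nat)):Int))
            = ((n ^^^ 4 : Nat) : Int) := bxor_shift n 2
        have hx0 : (n ^^^ 4) % 2 = n % 2 := by simpa using hx.1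
        have hx1 : (n ^^^ 4) / 2 % 2 = n / 2 % 2 := by simpa using hx.2
        show List.foldl _ (cliff_mult ((n:Nat):Int) s ((1:Int) <<< (((2:Nat)):Int)) 1) ps
            = (List.foldl _ (PySem.Int.bxor ((n:Nat):Int) ((1:Int) <<< (((2:Nat)):Int))) ps,
               if (List.foldl _ (asc + c0 + c1, c0, c1) ps).1 % 2 = 1 then (-1:Int) else 1)
        rw [hcs', hbx']
        refine IH _ _ (asc + c0 + c1) c0 c1 (by omega) (by omega) ?_
        rw [hs, Nat.add_assoc]
        exact sgn_flip asc (c0 + c1) (n % 2 + n / 2 % 2) (by omega)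
      · -- p ≥ 3
        simp only [show k+1+1+1 = k+3 from rfl] at hx hneg
        have hsh : ((1:Int) <<< (((k+3:Nat)):Int)) = (1:Int) <<< ((k+3 : Nat)) :=
          Int.shiftLeft_natCast_right 1 (k+3)
        have hcs' : cliff_mult ((n:Nat):Int) s ((1:Int) <<< ((k+3:Nat))) 1
            = (((n ^^^ 2^(k+3) : Nat) : Int), s) := by
          have := cliff_step n s (k+3)
          rw [if_neg (by omega : ¬(k+3 = 1)), if_neg (by omega : ¬(k+3 = 2)), hsh] at this
          exact this
        have hbx' : PySem.Int.bxor ((n:Nat):Int) ((1:Int) <<< ((k+3:Nat)))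
            = ((n ^^^ 2^(k+3) : Nat) : Int) := by
          have := bxor_shift n (k+3); rwa [hsh] at this
        have hx0 : (n ^^^ 2^(k+3)) % 2 = n % 2 := by
          have := hx.1; rw [if_neg (by omega : ¬(k+3 = 0))] at this; omega
        have hx1 : (n ^^^ 2^(k+3)) / 2 % 2 = n / 2 % 2 := by
          have := hx.2; rw [if_neg (by omega : ¬(k+3 = 1))] at this; omega
        have e0 : ¬(((k+3:Nat)):Int) = 0 := by exact_mod_cast (by omega : k+3 ≠ 0)
        have e1 : ¬(((k+3:Nat)):Int) = 1 := by exact_mod_cast (by omega : k+3 ≠ 1)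
        have e2 : ¬(((k+3:Nat)):Int) = 2 := by exact_mod_cast (by omega : k+3 ≠ 2)
        simp only [List.foldl, if_neg hneg, if_pos (Int.natCast_nonneg (k+3)),
          if_neg e0, if_neg e1, if_neg e2, Int.toNat_natCast,
          show (k+1+1+1 : Nat) = k+3 from rfl]
        rw [hcs', hbx']
        exact IH _ _ asc c0 c1 (by omega) (by omega) hs

-- ===== VERDICT (by name: the statement is the Claim_ definition above) =====
theorem reduce_ports_spec : Claim_equal_reduce_ports := by
  intro ports _
  unfold Spec_reduce_ports reduce_ports reduce_ports_alt
  simpa using loop_eq ports 0 1 0 0 0 rfl rfl rfl
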